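-- pv_equiv track=rewrite | github.com/fzinnah17/leetcode-fz | validGraph.py | validGraph
-- ===== SOURCE A (Python) =====
-- from collections import defaultdict
--
-- def validGraph(n, edges):
--     visited = set()
--   #building the adjacency list for the given graph
--     def buildList(edges):
--         adjList = defaultdict(list)
--         for e in edges:
--             a,b = e
--             adjList[a].append(b)
--             adjList[b].append(a)
--         return adjList
--     adjList = buildList(edges)
--     #helper function to implement on each node of the graph
--     def dfs(node,parent):
--         if node in visited: # There is a cycle in the graph
--             return False
--         #if we couldn't find the node in the set, then add it
--         visited.add(node)
--
--         for neighbor in adjList[node]: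
--             if neighbor == parent:
--                 continue # Skip the parent node in an undirected graph
--             #else
--             #Recursively call the dfs function for each neighbor, here node becomes the parent
--             if not dfs(neighbor,node):
--                 return False
--         return True
--     if not dfs(0,-1): #the starting node is 0th index and it has no parent so it is -1 for the parent and we will return False for that
--         return False
--     return len(visited) == n #as long as visited nodes are same as the given n we are returning True
-- ===== SOURCE B (Python) =====
-- from collections import defaultdict
--
-- def validGraph(n, edges):
--     adjList = defaultdict(list)
--     for a, b in edges:
--         adjList[a].append(b)
--         adjList[b].append(a)
--     visited = set()
--     stack = [(0, -1)]
--     while stack: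
--         node, parent = stack.pop()
--         if node in visited:
--             return False
--         visited.add(node)
--         for neighbor in reversed(adjList[node]):
--             if neighbor != parent:
--                 stack.append((neighbor, node))
--     return len(visited) == n
-- ===== Notes on version B (the rewrite author's own statement) =====
-- stated objective: alternative
-- what changed: A's recursive dfs with a mutable visited set is replaced by an explicit iterative traversal using a stack of (node, parent) pairs (neighbors pushed in reverse, so the visit order is the same); the adjacency list is built the same way.
import Mathlib
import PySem

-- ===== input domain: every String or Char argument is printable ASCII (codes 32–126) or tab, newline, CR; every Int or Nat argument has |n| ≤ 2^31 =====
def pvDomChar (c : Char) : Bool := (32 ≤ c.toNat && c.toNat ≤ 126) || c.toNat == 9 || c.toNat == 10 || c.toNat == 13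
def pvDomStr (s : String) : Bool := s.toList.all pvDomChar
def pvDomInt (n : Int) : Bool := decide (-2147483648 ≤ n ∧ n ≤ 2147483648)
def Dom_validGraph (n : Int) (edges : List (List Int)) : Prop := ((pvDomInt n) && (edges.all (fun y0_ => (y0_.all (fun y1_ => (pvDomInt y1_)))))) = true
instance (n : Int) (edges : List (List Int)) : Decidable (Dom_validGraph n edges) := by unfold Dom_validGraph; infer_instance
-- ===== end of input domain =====

-- B replaces A's recursive DFS by an explicit iterative traversal with a stack of
-- (node, parent) pairs (same traversal order, no recursion); equal return values on Pre_.

-- ===== PORT A =====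
-- adjacency list shared by both Pythons: for a,b in edges: adj[a].append(b); adj[b].append(a)
-- (edges whose length is not 2 raise ValueError in Python; Pre_ excludes them, the port skips them)
def buildAdj (edges : List (List Int)) : PySem.Dict Int (List Int) :=
  edges.foldl (fun d e =>
    match e with
    | [a, b] => (d.modify a [] (· ++ [b])).modify b [] (· ++ [a])
    | _ => d) PySem.Dict.empty

-- A's recursive dfs, with visited threaded through; fuel bounds the recursion DEPTH only
-- (each nested call visits a fresh node, so the fuel chosen in validGraph is never exhausted)
mutual
def dfsA (adj : PySem.Dict Int (List Int)) : Nat → Int → Int → PySem.Set Int → Bool × PySem.Set Int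
  | 0, _, _, vis => (false, vis)
  | fuel + 1, node, parent, vis =>
    if PySem.Set.contains vis node then (false, vis)
    else goA adj fuel (adj.getD node []) node parent (PySem.Set.add vis node)
termination_by fuel _ _ _ => (fuel, 0)

-- the 'for neighbor in adjList[node]' loop inside dfs
def goA (adj : PySem.Dict Int (List Int)) : Nat → List Int → Int → Int → PySem.Set Int → Bool × PySem.Set Int
  | _, [], _, _, vis => (true, vis)
  | fuel, nb :: rest, node, parent, vis =>
    if nb == parent then goA adj fuel rest node parent vis
    else
      match dfsA adj fuel nb node vis with
      | (false, v) => (false, v)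
      | (true, v) => goA adj fuel rest node parent v
termination_by fuel l _ _ _ => (fuel, l.length + 1)
end

def validGraph (n : Int) (edges : List (List Int)) : Bool :=
  let adj := buildAdj edges
  match dfsA adj (2 * edges.length + 2) 0 (-1) PySem.Set.empty with
  | (false, _) => false
  | (true, vis) => PySem.Set.len vis == n

-- ===== PORT B =====
-- all node labels occurring in adj (used only for loopB's termination measure)
def adjBase (adj : PySem.Dict Int (List Int)) : Finset Int :=
  (adj.items.flatMap (fun p => p.1 :: p.2)).toFinset

theorem mem_adjBase_of_getD {adj : PySem.Dict Int (List Int)} {k x : Int}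
    (h : x ∈ adj.getD k []) : x ∈ adjBase adj := by
  rw [PySem.Dict.getD_eq_get?_getD] at h
  cases hg : adj.get? k with
  | none => rw [hg] at h; simp at h
  | some v =>
    rw [hg] at h
    have hm := PySem.Dict.mem_items_of_get?_eq_some adj hg
    simp only [adjBase, List.mem_toFinset, List.mem_flatMap]
    exact ⟨(k, v), hm, by simpa using Or.inr h⟩

-- 'for neighbor in reversed(adjList[node]): if neighbor != parent: stack.append((neighbor, node))'
def pushB (adj : PySem.Dict Int (List Int)) (node parent : Int) (st : List (Int × Int)) :
    List (Int × Int) :=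
  (adj.getD node []).reverse.foldl
    (fun s nb => if nb != parent then (nb, node) :: s else s) st

theorem pushB_eq (adj : PySem.Dict Int (List Int)) (node parent : Int) (st : List (Int × Int)) :
    pushB adj node parent st =
      ((adj.getD node []).filter (fun nb => nb != parent)).map (fun nb => (nb, node)) ++ st := by
  unfold pushB
  rw [List.foldl_reverse]
  induction adj.getD node [] with
  | nil => rfl
  | cons nb rest ih =>
    rw [List.foldr_cons, ih, List.filter_cons]
    by_cases h : nb = parent <;> simp [h]

def measB (adj : PySem.Dict Int (List Int)) (stack : List (Int × Int)) (vis : PySem.Set Int) : Nat :=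
  ((adjBase adj ∪ (stack.map Prod.fst).toFinset) \ vis.toFinset).card

theorem measB_push_lt (adj : PySem.Dict Int (List Int)) (node parent : Int)
    (st : List (Int × Int)) (vis : PySem.Set Int) (hv : node ∉ vis) :
    measB adj (pushB adj node parent st) (PySem.Set.add vis node) <
      measB adj ((node, parent) :: st) vis := by
  apply Finset.card_lt_card
  rw [Finset.ssubset_iff_of_subset]
  · refine ⟨node, ?_, ?_⟩
    · simp [hv]
    · intro hc
      have := (Finset.mem_sdiff.mp hc).2
      apply this
      simp [PySem.Set.mem_add]
  · intro x hx
    rcases Finset.mem_sdiff.mp hx with ⟨hx1, hx2⟩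
    rw [Finset.mem_sdiff]
    constructor
    · rcases Finset.mem_union.mp hx1 with h | h
      · exact Finset.mem_union_left _ h
      · rw [List.mem_toFinset, pushB_eq] at h
        simp only [List.map_append, List.mem_append, List.map_map] at h
        rcases h with h | h
        · simp only [List.mem_map, Function.comp] at h
          rcases h with ⟨nb, hnb, hfst⟩
          apply Finset.mem_union_left
          exact hfst ▸ mem_adjBase_of_getD (List.mem_of_mem_filter hnb)
        · apply Finset.mem_union_right
          simp only [List.map_cons, List.toFinset_cons, Finset.mem_insert]
          exact Or.inr (by simpa using h)
    · intro hc
      exact hx2 (by simp [PySem.Set.mem_add]; exact Or.inl (by simpa using hc))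

-- the 'while stack:' loop of B
def loopB (n : Int) (adj : PySem.Dict Int (List Int)) :
    List (Int × Int) → PySem.Set Int → Bool
  | [], vis => PySem.Set.len vis == n
  | (node, parent) :: st, vis =>
    if _h : PySem.Set.contains vis node then false
    else loopB n adj (pushB adj node parent st) (PySem.Set.add vis node)
termination_by stack vis => measB adj stack vis
decreasing_by
  exact measB_push_lt adj node parent st vis (by simpa [PySem.Set.contains] using _h)

def validGraph_alt (n : Int) (edges : List (List Int)) : Bool :=
  loopB n (buildAdj edges) [(0, -1)] PySem.Set.empty

-- ===== PRECONDITION & SPEC =====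
-- Pre_ excludes edges that are not two-element lists: Python's 'a,b = e' raises ValueError there.
def Pre_validGraph (n : Int) (edges : List (List Int)) : Prop := ∀ e ∈ edges, e.length = 2
instance (n : Int) (edges : List (List Int)) : Decidable (Pre_validGraph n edges) := by
  unfold Pre_validGraph; infer_instance

def pvWitness_validGraph : Int × List (List Int) := (3, [[0, 1], [0, 2]])

def Spec_validGraph (n : Int) (edges : List (List Int)) (out : Bool) : Prop := out = validGraph_alt n edges
instance (n : Int) (edges : List (List Int)) (out : Bool) : Decidable (Spec_validGraph n edges out) := by unfold Spec_validGraph; infer_instance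

-- ===== CLAIM (what is proved, stated in full; the proofs are below) =====
def Claim_equal_validGraph : Prop := ∀ (n : Int) (edges : List (List Int)), Dom_validGraph n edges → Pre_validGraph n edges → Spec_validGraph n edges (validGraph n edges)

-- ===== LEMMAS AND PROOFS =====

-- visited only grows through dfsA / goA
theorem dfs_mono (adj : PySem.Dict Int (List Int)) :
    ∀ fuel : Nat,
      (∀ node parent vis (x : Int), x ∈ vis → x ∈ (dfsA adj fuel node parent vis).2) ∧
      (∀ l node parent vis (x : Int), x ∈ vis → x ∈ (goA adj fuel l node parent vis).2) := by
  intro fuel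
  induction fuel with
  | zero =>
    have hd : ∀ (node parent : Int) (vis : PySem.Set Int) (x : Int),
        x ∈ vis → x ∈ (dfsA adj 0 node parent vis).2 := by
      intro node parent vis x hx; simpa [dfsA] using hx
    refine ⟨hd, ?_⟩
    intro l
    induction l with
    | nil => intro node parent vis x hx; simpa [goA] using hx
    | cons nb rest ihl =>
      intro node parent vis x hx
      rw [goA]
      by_cases hp : nb = parent
      · simpa [hp] using ihl node parent vis x hx
      · rw [if_neg (by simpa using hp)]
        cases hres : dfsA adj 0 nb node vis with
        | mk b v =>
          have hv : x ∈ v := by have := hd nb node vis x hx; rwa [hres] at this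
          cases b
          · simpa using hv
          · simpa using ihl node parent v x hv
  | succ fuel ih =>
    have hd : ∀ (node parent : Int) (vis : PySem.Set Int) (x : Int),
        x ∈ vis → x ∈ (dfsA adj (fuel + 1) node parent vis).2 := by
      intro node parent vis x hx
      rw [dfsA]
      by_cases hv : node ∈ vis
      · simpa [PySem.Set.contains, hv] using hx
      · rw [if_neg (by simpa [PySem.Set.contains] using hv)]
        exact ih.2 _ node parent _ x ((PySem.Set.mem_add vis node x).mpr (Or.inl hx))
    refine ⟨hd, ?_⟩
    intro l
    induction l with
    | nil => intro node parent vis x hx; simpa [goA] using hx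
    | cons nb rest ihl =>
      intro node parent vis x hx
      rw [goA]
      by_cases hp : nb = parent
      · simpa [hp] using ihl node parent vis x hx
      · rw [if_neg (by simpa using hp)]
        cases hres : dfsA adj (fuel + 1) nb node vis with
        | mk b v =>
          have hv : x ∈ v := by have := hd nb node vis x hx; rwa [hres] at this
          cases b
          · simpa using hv
          · simpa using ihl node parent v x hv

-- the simulation: the stack loop run on ((node,parent) :: st) behaves like dfs(node,parent)
-- followed by the loop on st
theorem sim (n : Int) (adj : PySem.Dict Int (List Int)) (U : Finset Int)
    (Hadj : ∀ k x : Int, x ∈ adj.getD k [] → x ∈ U) :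
    ∀ fuel : Nat,
      (∀ (node parent : Int) (vis : PySem.Set Int) (st : List (Int × Int)),
        node ∈ U → (U \ vis.toFinset).card < fuel →
        loopB n adj ((node, parent) :: st) vis =
          match dfsA adj fuel node parent vis with
          | (false, _) => false
          | (true, v) => loopB n adj st v) ∧
      (∀ (l : List Int) (node parent : Int) (vis : PySem.Set Int) (st : List (Int × Int)),
        (∀ x ∈ l, x ∈ U) → (U \ vis.toFinset).card < fuel →
        loopB n adj ((l.filter (fun nb => nb != parent)).map (fun nb => (nb, node)) ++ st) vis =
          match goA adj fuel l node parent vis with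
          | (false, _) => false
          | (true, v) => loopB n adj st v) := by
  intro fuel
  induction fuel with
  | zero =>
    exact ⟨fun _ _ _ _ _ h => absurd h (Nat.not_lt_zero _),
           fun _ _ _ _ _ _ h => absurd h (Nat.not_lt_zero _)⟩
  | succ fuel ih =>
    have hP : ∀ (node parent : Int) (vis : PySem.Set Int) (st : List (Int × Int)),
        node ∈ U → (U \ vis.toFinset).card < fuel + 1 →
        loopB n adj ((node, parent) :: st) vis =
          match dfsA adj (fuel + 1) node parent vis with
          | (false, _) => false
          | (true, v) => loopB n adj st v := by
      intro node parent vis st hnode hcard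
      rw [loopB, dfsA]
      by_cases hv : node ∈ vis
      · rw [dif_pos (by simpa [PySem.Set.contains] using hv),
            if_pos (by simpa [PySem.Set.contains] using hv)]
      · rw [dif_neg (by simpa [PySem.Set.contains] using hv),
            if_neg (by simpa [PySem.Set.contains] using hv), pushB_eq]
        have hvt : (PySem.Set.add vis node).toFinset = insert node vis.toFinset := by
          simp [PySem.Set.add, PySem.Set.contains, hv, List.toFinset_append]
        have hcard' : (U \ (PySem.Set.add vis node).toFinset).card < fuel := by
          rw [hvt, Finset.sdiff_insert]
          have hmem : node ∈ U \ vis.toFinset := by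
            rw [Finset.mem_sdiff]; exact ⟨hnode, by simpa using hv⟩
          have h1 : 0 < (U \ vis.toFinset).card := Finset.card_pos.mpr ⟨node, hmem⟩
          rw [Finset.card_erase_of_mem hmem]
          omega
        exact ih.2 (adj.getD node []) node parent (PySem.Set.add vis node) st
          (fun x hx => Hadj node x hx) hcard'
    refine ⟨hP, ?_⟩
    intro l
    induction l with
    | nil =>
      intro node parent vis st _ _
      simp [goA]
    | cons nb rest ihl =>
      intro node parent vis st hl hcard
      rw [goA]
      by_cases hp : nb = parent
      · rw [if_pos (by simpa using hp)]
        have : List.filter (fun nb => nb != parent) (nb :: rest) =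
            List.filter (fun nb => nb != parent) rest := by
          simp [hp]
        rw [this]
        exact ihl node parent vis st (fun x hx => hl x (List.mem_cons_of_mem _ hx)) hcard
      · rw [if_neg (by simpa using hp)]
        have hfc : List.filter (fun nb => nb != parent) (nb :: rest) =
            nb :: List.filter (fun nb => nb != parent) rest := by
          simp [hp]
        rw [hfc, List.map_cons, List.cons_append]
        rw [hP nb node vis
          ((List.filter (fun nb => nb != parent) rest).map (fun nb => (nb, node)) ++ st)
          (hl nb List.mem_cons_self) hcard]
        cases hres : dfsA adj (fuel + 1) nb node vis with
        | mk b v =>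
          cases b
          · rfl
          · have hsub : vis.toFinset ⊆ v.toFinset := by
              intro x hx
              rw [List.mem_toFinset] at hx ⊢
              have := (dfs_mono adj (fuel + 1)).1 nb node vis x hx
              rwa [hres] at this
            have hcard2 : (U \ v.toFinset).card < fuel + 1 :=
              lt_of_le_of_lt
                (Finset.card_le_card (Finset.sdiff_subset_sdiff (le_refl U) hsub)) hcard
            exact ihl node parent v st (fun x hx => hl x (List.mem_cons_of_mem _ hx)) hcard2

-- every value stored by buildAdj satisfies any predicate holding on the edge endpoints
theorem buildAdj_inv (P : Int → Prop) :
    ∀ (es : List (List Int)) (d : PySem.Dict Int (List Int)),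
      (∀ k x : Int, x ∈ d.getD k [] → P x) → (∀ e ∈ es, ∀ x ∈ e, P x) →
      ∀ k x : Int, x ∈ (es.foldl (fun d e =>
        match e with
        | [a, b] => (d.modify a [] (· ++ [b])).modify b [] (· ++ [a])
        | _ => d) d).getD k [] → P x := by
  intro es
  induction es with
  | nil => intro d hd _ k x hx; exact hd k x hx
  | cons e es ihe =>
    intro d hd he k x hx
    rw [List.foldl_cons] at hx
    refine ihe _ ?_ (fun e' h' x' hx' => he e' (List.mem_cons_of_mem _ h') x' hx') k x hx
    intro k' x' hx'
    rcases e with _ | ⟨a, _ | ⟨b, _ | ⟨c, tl⟩⟩⟩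
    · exact hd _ _ hx'
    · exact hd _ _ hx'
    · have ha : P a := he _ (List.mem_cons_self) a (by simp)
      have hb : P b := he _ (List.mem_cons_self) b (by simp)
      simp only [PySem.Dict.getD_modify] at hx'
      split_ifs at hx' <;>
        (try simp only [List.mem_append, List.mem_singleton] at hx') <;>
        first
          | exact hd _ _ hx'
          | (rcases hx' with (hx' | rfl) | rfl
             · exact hd _ _ hx'
             · exact hb
             · exact ha)
          | (rcases hx' with hx' | rfl
             · exact hd _ _ hx'
             · exact ha)
          | (rcases hx' with hx' | rfl
             · exact hd _ _ hx'
             · exact hb)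
    · exact hd _ _ hx' 

theorem length_flatMap_of_pre :
    ∀ (edges : List (List Int)), (∀ e ∈ edges, e.length = 2) →
      (edges.flatMap id).length = 2 * edges.length := by
  intro edges
  induction edges with
  | nil => intro _; rfl
  | cons e es ih =>
    intro h
    have h2 : (id e).length = 2 := h e List.mem_cons_self
    rw [List.flatMap_cons, List.length_append,
        ih (fun e' h' => h e' (List.mem_cons_of_mem _ h')), h2, List.length_cons]
    omega

-- ===== VERDICT (by name: the statement is the Claim_ definition above) =====
theorem validGraph_spec : Claim_equal_validGraph := by
  intro n edges _ hpre
  unfold Spec_validGraph validGraph validGraph_alt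
  have hbuild : buildAdj edges = edges.foldl (fun d e =>
      match e with
      | [a, b] => (d.modify a [] (· ++ [b])).modify b [] (· ++ [a])
      | _ => d) PySem.Dict.empty := rfl
  have Hadj : ∀ k x : Int, x ∈ (buildAdj edges).getD k [] →
      x ∈ insert 0 (edges.flatMap id).toFinset := by
    intro k x hx
    rw [hbuild] at hx
    refine buildAdj_inv (fun y => y ∈ insert 0 (edges.flatMap id).toFinset) edges
      PySem.Dict.empty ?_ ?_ k x hx
    · intro k' x' hx'; rw [PySem.Dict.getD_empty] at hx'; simp at hx'
    · intro e he x' hx'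
      exact Finset.mem_insert_of_mem (List.mem_toFinset.mpr (List.mem_flatMap.mpr ⟨e, he, hx'⟩))
  have hfree : ((insert 0 (edges.flatMap id).toFinset) \ (PySem.Set.empty : PySem.Set Int).toFinset).card < 2 * edges.length + 2 := by
    have h1 : (PySem.Set.empty : PySem.Set Int).toFinset = ∅ := rfl
    rw [h1, Finset.sdiff_empty]
    have h2 : (insert 0 (edges.flatMap id).toFinset).card ≤
        (edges.flatMap id).toFinset.card + 1 := Finset.card_insert_le _ _
    have h3 : (edges.flatMap id).toFinset.card ≤ (edges.flatMap id).length :=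
      List.toFinset_card_le _
    have h4 := length_flatMap_of_pre edges hpre
    omega
  have hsim := (sim n (buildAdj edges) (insert 0 (edges.flatMap id).toFinset) Hadj
    (2 * edges.length + 2)).1 0 (-1) PySem.Set.empty [] (Finset.mem_insert_self _ _) hfree
  show (match dfsA (buildAdj edges) (2 * edges.length + 2) 0 (-1) PySem.Set.empty with
    | (false, _) => false
    | (true, vis) => PySem.Set.len vis == n) =
      loopB n (buildAdj edges) [(0, -1)] PySem.Set.empty
  rw [hsim]
  cases hres : dfsA (buildAdj edges) (2 * edges.length + 2) 0 (-1) PySem.Set.empty with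
  | mk b v => cases b <;> simp [loopB]
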